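-- pv_equiv track=rewrite | github.com/andrewyang96/AdventOfCode2017 | day09/solution.py | group_score
-- ===== SOURCE A (Python) =====
-- def group_score(stream: str) -> int:
--     score = 0
--     nesting = 0
--     in_garbage = False
--     cancel_next_char = False
--     for char in stream:
--         if in_garbage:
--             if cancel_next_char:
--                 cancel_next_char = False
--             elif char == '>':
--                 in_garbage = False
--             elif char == '!':
--                 cancel_next_char = True
--         elif char == '{':
--             nesting += 1
--             score += nesting
--         elif char == '}':
--             nesting -= 1
--         elif char == '<':
--             in_garbage = True
--         # commas are ignored
--     if nesting != 0:
--         raise ValueError('Incorrectly formed: nesting is {0}'.format(nesting))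
--     return score
-- ===== SOURCE B (Python) =====
-- def group_score(stream: str) -> int:
--     score = 0
--     nesting = 0
--     i = 0
--     n = len(stream)
--     while i < n:
--         c = stream[i]
--         if c == '{':
--             nesting += 1
--             score += nesting
--         elif c == '}':
--             nesting -= 1
--         elif c == '<':
--             i += 1
--             while i < n:
--                 g = stream[i]
--                 if g == '>':
--                     break
--                 if g == '!':
--                     i += 2
--                 else:
--                     i += 1
--         i += 1
--     if nesting != 0:
--         raise ValueError('Incorrectly formed: nesting is {0}'.format(nesting))
--     return score
-- ===== Notes on version B (the rewrite author's own statement) =====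
-- stated objective: alternative
-- what changed: Replaces A's single for-loop flag machine (in_garbage/cancel_next_char booleans) with an explicit-index while loop whose '<' case runs a nested inner loop that consumes the garbage, jumping two positions on '!' instead of carrying a cancellation flag.
import Mathlib
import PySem

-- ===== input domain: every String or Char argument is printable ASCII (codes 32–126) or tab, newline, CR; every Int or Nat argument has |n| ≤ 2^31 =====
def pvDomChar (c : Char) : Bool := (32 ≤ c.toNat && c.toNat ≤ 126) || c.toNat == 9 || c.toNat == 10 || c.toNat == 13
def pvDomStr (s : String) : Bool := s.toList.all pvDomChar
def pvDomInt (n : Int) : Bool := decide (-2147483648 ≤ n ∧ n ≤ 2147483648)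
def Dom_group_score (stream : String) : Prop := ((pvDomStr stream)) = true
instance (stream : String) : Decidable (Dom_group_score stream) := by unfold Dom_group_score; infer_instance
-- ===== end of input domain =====

-- B replaces A's flat flag machine (in_garbage / cancel_next_char booleans) by an explicit
-- index loop with a nested garbage-consuming inner loop that jumps over cancelled characters;
-- objective: alternative decomposition, same O(n) cost.


-- ===== PORT A =====
-- A's single for-loop state machine: state (score, nesting, in_garbage, cancel_next_char).
-- Returns the final (score, nesting); the raise on nesting ≠ 0 is excluded by Pre_group_score.
def aLoop : List Char → Int → Int → Bool → Bool → Int × Int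
  | [], score, nesting, _, _ => (score, nesting)
  | c :: rest, score, nesting, inG, cancel =>
    if inG then
      if cancel then aLoop rest score nesting true false
      else if c = '>' then aLoop rest score nesting false false
      else if c = '!' then aLoop rest score nesting true true
      else aLoop rest score nesting inG cancel
    else if c = '{' then aLoop rest (score + (nesting + 1)) (nesting + 1) inG cancel
    else if c = '}' then aLoop rest score (nesting - 1) inG cancel
    else if c = '<' then aLoop rest score nesting true cancel
    else aLoop rest score nesting inG cancel

def group_score (stream : String) : Int :=
  (aLoop stream.toList 0 0 false false).1

-- ===== PORT B =====
-- B's inner while loop: from index i, advance consuming garbage (skipping 2 on '!'),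
-- returning the index of the closing '>' (or an index ≥ length if the stream ends).
def skipGarbage (s : List Char) (i : Nat) : Nat :=
  if h : i < s.length then
    if s[i] = '>' then i
    else if s[i] = '!' then skipGarbage s (i + 2)
    else skipGarbage s (i + 1)
  else i
termination_by s.length - i

theorem skipGarbage_ge (s : List Char) (i : Nat) : i ≤ skipGarbage s i := by
  unfold skipGarbage
  split
  · split
    · exact Nat.le_refl _
    · split
      · exact le_trans (by omega) (skipGarbage_ge s (i + 2))
      · exact le_trans (by omega) (skipGarbage_ge s (i + 1))
  · exact Nat.le_refl _
termination_by s.length - i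

-- B's outer while loop over an explicit index.
def bLoop (s : List Char) (i : Nat) (score nesting : Int) : Int × Int :=
  if h : i < s.length then
    if s[i] = '{' then bLoop s (i + 1) (score + (nesting + 1)) (nesting + 1)
    else if s[i] = '}' then bLoop s (i + 1) score (nesting - 1)
    else if s[i] = '<' then bLoop s (skipGarbage s (i + 1) + 1) score nesting
    else bLoop s (i + 1) score nesting
  else (score, nesting)
termination_by s.length - i
decreasing_by
  · omega
  · omega
  · have := skipGarbage_ge s (i + 1); omega
  · omega

def group_score_alt (stream : String) : Int :=
  (bLoop stream.toList 0 0 0).1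

-- ===== PRECONDITION & SPEC =====
-- Pre_ excludes exactly the inputs on which Python A raises ValueError: streams whose braces
-- outside garbage are unbalanced.  preStep tracks (net brace count, in-garbage, cancel-next).
def preStep (st : Int × Bool × Bool) (c : Char) : Int × Bool × Bool :=
  match st with
  | (n, inG, cancel) =>
    if inG then
      if cancel then (n, true, false)
      else if c = '>' then (n, false, false)
      else if c = '!' then (n, true, true)
      else (n, true, false)
    else if c = '{' then (n + 1, false, false)
    else if c = '}' then (n - 1, false, false)
    else if c = '<' then (n, true, false)
    else (n, false, false)

def Pre_group_score (stream : String) : Prop :=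
  (stream.toList.foldl preStep (0, false, false)).1 = 0
instance (stream : String) : Decidable (Pre_group_score stream) := by unfold Pre_group_score; infer_instance

def pvWitness_group_score : String := "{<!>>{},{}}"

def Spec_group_score (stream : String) (out : Int) : Prop := out = group_score_alt stream
instance (stream : String) (out : Int) : Decidable (Spec_group_score stream out) := by unfold Spec_group_score; infer_instance

-- ===== CLAIM (what is proved, stated in full; the proofs are below) =====
def Claim_equal_group_score : Prop := ∀ (stream : String), Dom_group_score stream → Pre_group_score stream → Spec_group_score stream (group_score stream)

-- ===== LEMMAS AND PROOFS =====

-- Consuming garbage with A's flag machine from position i equals jumping to skipGarbage s i + 1.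
theorem aLoop_garbage (s : List Char) (i : Nat) (score nesting : Int) :
    aLoop (s.drop i) score nesting true false
      = aLoop (s.drop (skipGarbage s i + 1)) score nesting false false := by
  rw [skipGarbage]
  split
  · rename_i h
    rw [List.drop_eq_getElem_cons h]
    by_cases hgt : s[i] = '>'
    · simp [aLoop, hgt]
    · by_cases hbang : s[i] = '!'
      · simp only [hgt, hbang, if_true, if_false, ite_false, ite_true]
        rw [aLoop]
        simp only [if_true]
        by_cases h2 : i + 1 < s.length
        · rw [List.drop_eq_getElem_cons h2]
          rw [aLoop]
          simp only [if_true]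
          exact aLoop_garbage s (i + 2) score nesting
        · have e1 : s.drop (i + 1) = [] := List.drop_eq_nil_of_le (by omega)
          rw [e1]
          rw [skipGarbage]
          have hlen : ¬ (i + 2 < s.length) := by omega
          rw [dif_neg hlen]
          have e2 : s.drop (i + 2 + 1) = [] := List.drop_eq_nil_of_le (by omega)
          simp [aLoop, e2]
      · simp only [hgt, hbang, ite_false]
        rw [aLoop]
        simp only [if_true, hgt, hbang, ite_false]
        exact aLoop_garbage s (i + 1) score nesting
  · rename_i h
    have e1 : s.drop i = [] := List.drop_eq_nil_of_le (by omega)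
    have e2 : s.drop (i + 1) = [] := List.drop_eq_nil_of_le (by omega)
    rw [e1, e2]
    simp [aLoop]
termination_by s.length - i
decreasing_by all_goals omega

theorem bLoop_eq_aLoop (s : List Char) (i : Nat) (score nesting : Int) :
    bLoop s i score nesting = aLoop (s.drop i) score nesting false false := by
  rw [bLoop]
  split
  · rename_i h
    rw [List.drop_eq_getElem_cons h]
    by_cases h1 : s[i] = '{'
    · simp only [h1, if_true]
      rw [aLoop]
      simp [bLoop_eq_aLoop s (i + 1)]
    · by_cases h2 : s[i] = '}'
      · simp only [h1, h2, ite_false, if_true]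
        rw [aLoop]
        simp only [if_false, h1, h2, ite_false, ite_true]
        exact bLoop_eq_aLoop s (i + 1) score (nesting - 1)
      · by_cases h3 : s[i] = '<'
        · simp only [h1, h2, h3, ite_false, ite_true]
          rw [aLoop]
          simp only [if_false, h1, h2, h3, ite_false, ite_true]
          rw [bLoop_eq_aLoop s (skipGarbage s (i + 1) + 1) score nesting]
          exact (aLoop_garbage s (i + 1) score nesting).symm
        · simp only [h1, h2, h3, ite_false]
          rw [aLoop]
          simp only [if_false, h1, h2, h3, ite_false]
          exact bLoop_eq_aLoop s (i + 1) score nesting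
  · rename_i h
    rw [List.drop_eq_nil_of_le (by omega), aLoop]
termination_by s.length - i
decreasing_by
  · omega
  · omega
  · have := skipGarbage_ge s (i + 1); omega
  · omega

-- ===== VERDICT (by name: the statement is the Claim_ definition above) =====
theorem group_score_spec : Claim_equal_group_score := by
  intro stream _ _
  unfold Spec_group_score group_score group_score_alt
  rw [bLoop_eq_aLoop]
  rfl
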